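-- pv_equiv track=rewrite | github.com/fall-fest-latino/escuela-de-computacion-cuantica-2023 | challenges/PIQUE challenge/QuantumVoyagers/pkg/general_utils.py | complete_lists_with_dictionary
-- ===== SOURCE A (Python) =====
-- def complete_lists_with_dictionary(lists, dictionary):
--     """
--     Completes lists with characters from a dictionary.
--
--     Parameters:
--     - lists (list): A list of lists to be completed.
--     - dictionary (dict): A dictionary where keys are binary strings and values are probabilities.
--
--     Returns:
--     - result (list): A list of lists with characters filled in from the dictionary.
--     """
--     result = []
--
--     for key, value in dictionary.items():
--         # Create a copy of the original list
--         new_list = [list(row) for row in lists]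
--
--         # Convert the binary value of the key into a list of characters 'O' and 'X'
--         characters = ['O' if bit == '0' else 'X' for bit in key]
--
--         # Fill in the empty spaces in the new list with the corresponding characters
--         index = 0
--         for i in range(len(new_list)):
--             for j in range(len(new_list[i])):
--                 if new_list[i][j] == ' ':
--                     new_list[i][j] = characters[index]
--                     index += 1
--
--         result.append(new_list)
--
--     return result
-- ===== SOURCE B (Python) =====
-- def complete_lists_with_dictionary(lists, dictionary):
--     # Number the blank cells once into a template, then each key is a pure map.
--     template = []
--     n = 0
--     for row in lists:
--         trow = []
--         for cell in row:
--             if cell == ' ':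
--                 trow.append(n)
--                 n += 1
--             else:
--                 trow.append(cell)
--         template.append(trow)
--     return [[[('O' if key[c] == '0' else 'X') if isinstance(c, int) else c
--               for c in trow] for trow in template]
--             for key in dictionary]
-- ===== Notes on version B (the rewrite author's own statement) =====
-- stated objective: simpler
-- what changed: B numbers the blank cells once into a template grid, then produces each output grid by a pure per-cell map over the template, instead of A's per-key full rescan of the grid with a mutable fill counter.
import Mathlib
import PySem

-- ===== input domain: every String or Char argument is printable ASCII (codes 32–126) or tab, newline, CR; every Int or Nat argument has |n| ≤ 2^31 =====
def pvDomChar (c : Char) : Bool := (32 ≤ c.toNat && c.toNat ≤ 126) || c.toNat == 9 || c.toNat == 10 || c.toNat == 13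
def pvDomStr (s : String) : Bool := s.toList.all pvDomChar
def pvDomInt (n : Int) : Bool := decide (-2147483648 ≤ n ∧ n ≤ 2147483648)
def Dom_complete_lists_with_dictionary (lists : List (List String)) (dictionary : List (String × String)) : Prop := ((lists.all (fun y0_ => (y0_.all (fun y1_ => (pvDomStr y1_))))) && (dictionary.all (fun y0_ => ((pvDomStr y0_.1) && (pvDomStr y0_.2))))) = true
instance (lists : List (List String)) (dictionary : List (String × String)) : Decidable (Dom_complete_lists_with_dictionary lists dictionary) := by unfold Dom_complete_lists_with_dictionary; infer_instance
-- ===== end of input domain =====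

-- B numbers the blank cells once into a template and then fills each key by a pure map,
-- instead of A's per-key rescan of the grid with a mutable fill counter (objective: simpler).
-- No argument is mutated by either version.

-- ===== PORT A =====
-- inner loop 'for j in range(len(new_list[i]))' with the shared fill counter `index`
def pvFillRowA (chars : List String) : List String → Nat → List String × Nat
  | [], idx => ([], idx)
  | c :: cs, idx =>
    if c == " " then
      -- characters[index]; out-of-range (IndexError in Python) is excluded by Pre_
      let v := (PySem.List.pyGet? chars (idx : Int)).getD "?"
      let r := pvFillRowA chars cs (idx + 1)
      (v :: r.1, r.2)
    else
      let r := pvFillRowA chars cs idx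
      (c :: r.1, r.2)

-- outer loop 'for i in range(len(new_list))'
def pvFillRowsA (chars : List String) : List (List String) → Nat → List (List String) × Nat
  | [], idx => ([], idx)
  | row :: rows, idx =>
    let r := pvFillRowA chars row idx
    let rs := pvFillRowsA chars rows r.2
    (r.1 :: rs.1, rs.2)

def complete_lists_with_dictionary (lists : List (List String)) (dictionary : List (String × String)) : List (List (List String)) :=
  dictionary.foldl (fun result kv =>
    let new_list := lists.map (fun row => row)   -- [list(row) for row in lists]
    let characters := kv.1.toList.map (fun bit => if bit == '0' then "O" else "X")
    result ++ [(pvFillRowsA characters new_list 0).1]) []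

-- ===== PORT B =====
-- template row: each blank cell becomes its blank ordinal, other cells stay literal
def pvNumRowB : List String → Nat → List (Sum Nat String) × Nat
  | [], n => ([], n)
  | c :: cs, n =>
    if c == " " then
      let r := pvNumRowB cs (n + 1)
      (Sum.inl n :: r.1, r.2)
    else
      let r := pvNumRowB cs n
      (Sum.inr c :: r.1, r.2)

def pvNumRowsB : List (List String) → Nat → List (List (Sum Nat String)) × Nat
  | [], n => ([], n)
  | row :: rows, n =>
    let r := pvNumRowB row n
    let rs := pvNumRowsB rows r.2
    (r.1 :: rs.1, rs.2)

-- ('O' if key[c] == '0' else 'X') if isinstance(c, int) else c ; key[c] out of range excluded by Pre_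
def pvApplyCellB (key : String) : Sum Nat String → String
  | Sum.inl n =>
    match PySem.List.pyGet? key.toList (n : Int) with
    | some b => if b == '0' then "O" else "X"
    | none => "?"
  | Sum.inr s => s

def complete_lists_with_dictionary_alt (lists : List (List String)) (dictionary : List (String × String)) : List (List (List String)) :=
  let template := (pvNumRowsB lists 0).1
  dictionary.map (fun kv => template.map (fun trow => trow.map (pvApplyCellB kv.1)))

-- ===== PRECONDITION & SPEC =====
-- Pre_ excludes exactly the inputs where Python A raises IndexError: some key is shorter
-- than the number of blank (' ') cells of the grid.
def Pre_complete_lists_with_dictionary (lists : List (List String)) (dictionary : List (String × String)) : Prop :=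
  ∀ kv ∈ dictionary, (lists.map (fun r => r.countP (fun c => c == " "))).sum ≤ kv.1.toList.length
instance (lists : List (List String)) (dictionary : List (String × String)) : Decidable (Pre_complete_lists_with_dictionary lists dictionary) := by unfold Pre_complete_lists_with_dictionary; infer_instance

def pvWitness_complete_lists_with_dictionary : List (List String) × (List (String × String)) :=
  ([[" ", "a"], [" "]], [("01", "p")])

def Spec_complete_lists_with_dictionary (lists : List (List String)) (dictionary : List (String × String)) (out : List (List (List String))) : Prop := out = complete_lists_with_dictionary_alt lists dictionary
instance (lists : List (List String)) (dictionary : List (String × String)) (out : List (List (List String))) : Decidable (Spec_complete_lists_with_dictionary lists dictionary out) := by unfold Spec_complete_lists_with_dictionary; infer_instance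

-- ===== CLAIM (what is proved, stated in full; the proofs are below) =====
def Claim_equal_complete_lists_with_dictionary : Prop := ∀ (lists : List (List String)) (dictionary : List (String × String)), Dom_complete_lists_with_dictionary lists dictionary → Pre_complete_lists_with_dictionary lists dictionary → Spec_complete_lists_with_dictionary lists dictionary (complete_lists_with_dictionary lists dictionary)

-- ===== LEMMAS AND PROOFS =====
theorem pvValA_eq (key : String) (idx : Nat) :
    (PySem.List.pyGet? (key.toList.map (fun bit => if bit == '0' then "O" else "X")) (idx : Int)).getD "?"
      = pvApplyCellB key (Sum.inl idx) := by
  simp only [pvApplyCellB, PySem.List.pyGet?_natCast, List.getElem?_map]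
  cases key.toList[idx]? <;> simp

theorem pvFillRowA_eq (key : String) (row : List String) (idx : Nat) :
    pvFillRowA (key.toList.map (fun bit => if bit == '0' then "O" else "X")) row idx
      = ((pvNumRowB row idx).1.map (pvApplyCellB key), (pvNumRowB row idx).2) := by
  induction row generalizing idx with
  | nil => rfl
  | cons c cs ih =>
    by_cases h : c == " "
    · simp only [pvFillRowA, pvNumRowB, if_pos h, ih, List.map_cons, pvValA_eq]
    · simp only [pvFillRowA, pvNumRowB, if_neg h, ih, List.map_cons, pvApplyCellB]

theorem pvFillRowsA_eq (key : String) (rows : List (List String)) (idx : Nat) :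
    pvFillRowsA (key.toList.map (fun bit => if bit == '0' then "O" else "X")) rows idx
      = ((pvNumRowsB rows idx).1.map (fun trow => trow.map (pvApplyCellB key)), (pvNumRowsB rows idx).2) := by
  induction rows generalizing idx with
  | nil => rfl
  | cons r rs ih =>
    simp only [pvFillRowsA, pvNumRowsB, pvFillRowA_eq, ih, List.map_cons]

theorem pvFoldA_eq (lists : List (List String)) (dictionary : List (String × String)) (acc : List (List (List String))) :
    dictionary.foldl (fun result kv =>
      let new_list := lists.map (fun row => row)
      let characters := kv.1.toList.map (fun bit => if bit == '0' then "O" else "X")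
      result ++ [(pvFillRowsA characters new_list 0).1]) acc
    = acc ++ dictionary.map (fun kv => ((pvNumRowsB lists 0).1.map (fun trow => trow.map (pvApplyCellB kv.1)))) := by
  induction dictionary generalizing acc with
  | nil => simp
  | cons kv rest ih =>
    rw [List.foldl_cons, ih]
    simp only [List.map_cons]
    rw [pvFillRowsA_eq]
    simp [List.map_id']

-- ===== VERDICT (by name: the statement is the Claim_ definition above) =====
theorem complete_lists_with_dictionary_spec : Claim_equal_complete_lists_with_dictionary := by
  intro lists dictionary _ _
  unfold Spec_complete_lists_with_dictionary complete_lists_with_dictionary complete_lists_with_dictionary_alt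
  simpa using pvFoldA_eq lists dictionary []
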